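-- pv_equiv track=rewrite | github.com/V1B3hR/agentnet | agentnet/dialogue/enhanced_modes.py | _update_gaps_after_turn
-- ===== SOURCE A (Python) =====
-- from typing import Any, Dict, List, Optional, Callable, Awaitable, TYPE_CHECKING
--
-- def _update_gaps_after_turn(gaps: List[str], interpolations: List[str]) -> List[str]:
--     """Update remaining gaps after a turn with interpolations."""
--     remaining_gaps = []
--
--     for gap in gaps:
--         gap_addressed = False
--         for interpolation in interpolations:
--             if any(word in interpolation.lower() for word in gap.lower().split()):
--                 gap_addressed = True
--                 break
--
--         if not gap_addressed:
--             remaining_gaps.append(gap)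
--
--     return remaining_gaps
-- ===== SOURCE B (Python) =====
-- def _update_gaps_after_turn(gaps, interpolations):
--     """Update remaining gaps after a turn with interpolations."""
--     blob = " ".join(i.lower() for i in interpolations)
--     return [gap for gap in gaps
--             if not any(word in blob for word in gap.lower().split())]
-- ===== Notes on version B (the rewrite author's own statement) =====
-- stated objective: faster
-- what changed: Replaces the nested gap-by-interpolation scan with one precomputed space-joined lowercased blob and a single substring test per gap word; exact because split() words contain no whitespace and so cannot match across a join boundary.
import Mathlib
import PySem

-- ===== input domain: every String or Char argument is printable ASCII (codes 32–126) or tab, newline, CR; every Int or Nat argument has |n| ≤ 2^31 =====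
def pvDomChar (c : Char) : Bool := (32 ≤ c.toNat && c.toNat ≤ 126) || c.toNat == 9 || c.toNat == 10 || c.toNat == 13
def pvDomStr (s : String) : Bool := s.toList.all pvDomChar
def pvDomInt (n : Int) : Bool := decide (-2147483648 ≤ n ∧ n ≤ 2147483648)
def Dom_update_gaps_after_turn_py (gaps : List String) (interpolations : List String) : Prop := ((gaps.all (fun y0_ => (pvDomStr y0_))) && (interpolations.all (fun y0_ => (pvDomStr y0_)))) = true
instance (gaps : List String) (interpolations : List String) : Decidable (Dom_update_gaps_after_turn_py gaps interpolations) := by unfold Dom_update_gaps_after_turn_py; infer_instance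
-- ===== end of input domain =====

-- B replaces the nested gap-by-interpolation scan with one precomputed space-joined lowercased blob
-- and a single substring test per gap word (measured faster; exact because split() words contain no whitespace).

-- ===== PORT A =====
def update_gaps_after_turn_py (gaps : List String) (interpolations : List String) : List String :=
  gaps.foldl (fun remaining_gaps gap =>
    let gap_addressed := interpolations.any (fun interpolation =>
      (PySem.Str.split₀ (PySem.Str.lower gap)).any (fun word =>
        PySem.Str.isIn word (PySem.Str.lower interpolation)))
    if !gap_addressed then remaining_gaps ++ [gap] else remaining_gaps) []

-- ===== PORT B =====
def update_gaps_after_turn_py_alt (gaps : List String) (interpolations : List String) : List String :=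
  let blob := PySem.Str.join " " (interpolations.map (fun i => PySem.Str.lower i))
  gaps.filter (fun gap =>
    !((PySem.Str.split₀ (PySem.Str.lower gap)).any (fun word => PySem.Str.isIn word blob)))

-- ===== PRECONDITION & SPEC =====
def Spec_update_gaps_after_turn_py (gaps : List String) (interpolations : List String) (out : List String) : Prop := out = update_gaps_after_turn_py_alt gaps interpolations
instance (gaps : List String) (interpolations : List String) (out : List String) : Decidable (Spec_update_gaps_after_turn_py gaps interpolations out) := by unfold Spec_update_gaps_after_turn_py; infer_instance

-- ===== CLAIM (what is proved, stated in full; the proofs are below) =====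
def Claim_equal_update_gaps_after_turn_py : Prop := ∀ (gaps : List String) (interpolations : List String), Dom_update_gaps_after_turn_py gaps interpolations → Spec_update_gaps_after_turn_py gaps interpolations (update_gaps_after_turn_py gaps interpolations)

-- ===== LEMMAS AND PROOFS =====

-- every word produced by Python's str.split() is nonempty and contains no whitespace character
lemma split₀_go_words (s : List Char) : ∀ (cur : List Char) (acc : List (List Char)) (_ : ∀ c ∈ cur, PySem.Chars.isspace c = false)
    (_ : ∀ w ∈ acc, w ≠ [] ∧ ∀ c ∈ w, PySem.Chars.isspace c = false),
    ∀ w ∈ PySem.Chars.split₀.go s cur acc, w ≠ [] ∧ ∀ c ∈ w, PySem.Chars.isspace c = false := by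
  induction s with
  | nil =>
    intro cur acc hcur hacc w hw
    by_cases hc : cur.isEmpty
    · simp [PySem.Chars.split₀.go, hc] at hw
      exact hacc w hw
    · simp [PySem.Chars.split₀.go, hc] at hw
      rcases hw with hw | hw
      · exact hacc w hw
      · subst hw
        refine ⟨by simpa using (List.isEmpty_eq_false_iff.mp (by simpa using hc)), ?_⟩
        intro c hc'; exact hcur c (by simpa using hc')
  | cons a s ih =>
    intro cur acc hcur hacc w hw
    by_cases hs : PySem.Chars.isspace a
    · by_cases hc : cur.isEmpty
      · rw [show PySem.Chars.split₀.go (a :: s) cur acc = PySem.Chars.split₀.go s [] acc by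
          simp [PySem.Chars.split₀.go, hs, hc]] at hw
        exact ih [] acc (by simp) hacc w hw
      · rw [show PySem.Chars.split₀.go (a :: s) cur acc = PySem.Chars.split₀.go s [] (cur.reverse :: acc) by
          simp [PySem.Chars.split₀.go, hs, hc]] at hw
        refine ih [] (cur.reverse :: acc) (by simp) ?_ w hw
        intro v hv
        rcases List.mem_cons.mp hv with hv | hv
        · subst hv
          constructor
          · simpa using (List.isEmpty_eq_false_iff.mp (by simpa using hc))
          · intro c hc'; exact hcur c (by simpa using hc')
        · exact hacc v hv
    · rw [show PySem.Chars.split₀.go (a :: s) cur acc = PySem.Chars.split₀.go s (a :: cur) acc by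
        simp [PySem.Chars.split₀.go, hs]] at hw
      refine ih (a :: cur) acc ?_ hacc w hw
      intro c hc'
      rcases List.mem_cons.mp hc' with hc' | hc'
      · subst hc'; simpa using hs
      · exact hcur c hc'

lemma split₀_words (s : List Char) : ∀ w ∈ PySem.Chars.split₀ s, w ≠ [] ∧ (' ' : Char) ∉ w := by
  intro w hw
  have h := split₀_go_words s [] [] (by simp) (by simp) w (by simpa [PySem.Chars.split₀] using hw)
  refine ⟨h.1, fun hmem => ?_⟩
  have := h.2 ' ' hmem
  simp [PySem.Chars.isspace] at this

-- a prefix of xs ++ sep :: ys that avoids sep is a prefix of xs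
lemma prefix_of_append_cons {w xs ys : List Char} {sep : Char} (hsep : sep ∉ w)
    (h : w <+: xs ++ sep :: ys) : w <+: xs := by
  rw [List.prefix_iff_eq_take] at h
  by_cases hl : w.length ≤ xs.length
  · rw [List.prefix_iff_eq_take, h, List.take_append, Nat.sub_eq_zero_of_le hl]
    simp
  · exfalso
    apply hsep
    rw [h, List.take_append]
    have : 0 < w.length - xs.length := by omega
    have hsep' : sep ∈ (sep :: ys).take (w.length - xs.length) := by
      rcases Nat.exists_eq_add_of_lt this with ⟨k, hk⟩
      cases hk' : w.length - xs.length with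
      | zero => omega
      | succ n => simp
    exact List.mem_append_right _ hsep'

-- an infix of xs ++ sep :: ys that avoids sep lies in xs or in ys
lemma infix_append_cons_iff {w xs ys : List Char} {sep : Char} (hsep : sep ∉ w) :
    w <:+: xs ++ sep :: ys ↔ w <:+: xs ∨ w <:+: ys := by
  constructor
  · rintro ⟨s, t, hst⟩
    have hw : w <+: (xs ++ sep :: ys).drop s.length := by
      rw [← hst, List.append_assoc, List.drop_left]
      exact ⟨t, rfl⟩
    by_cases hl : s.length ≤ xs.length
    · left
      rw [List.drop_append, Nat.sub_eq_zero_of_le hl, List.drop_zero] at hw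
      exact ((prefix_of_append_cons hsep hw).isInfix).trans (List.drop_suffix _ xs).isInfix
    · right
      have hk : s.length - xs.length = (s.length - xs.length - 1) + 1 := by omega
      rw [List.drop_append, hk] at hw
      simp only [List.drop_succ_cons] at hw
      have : w <+: ys.drop (s.length - xs.length - 1) := by
        have hxs : xs.drop s.length = [] := by
          apply List.drop_eq_nil_of_le; omega
        simpa [hxs] using hw
      exact (this.isInfix).trans (List.drop_suffix _ ys).isInfix
  · rintro (h | h)
    · exact h.trans (List.prefix_append xs _).isInfix
    · exact h.trans ((List.suffix_cons sep ys).trans (List.suffix_append xs _)).isInfix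

-- a nonempty, space-free word is a substring of ' '.join(ps) iff it is a substring of some piece
lemma infix_join_iff {w : List Char} (hw : w ≠ []) (hsep : (' ' : Char) ∉ w) :
    ∀ ps : List (List Char), (w <:+: PySem.Chars.join [' '] ps ↔ ∃ p ∈ ps, w <:+: p) := by
  intro ps
  induction ps with
  | nil => simp [PySem.Chars.join_nil, hw]
  | cons p rest ih =>
    cases rest with
    | nil => simp [PySem.Chars.join_singleton]
    | cons q rs =>
      rw [PySem.Chars.join_cons_cons, List.append_assoc, List.singleton_append,
        infix_append_cons_iff hsep, ih]
      simp only [List.mem_cons]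
      constructor
      · rintro (h | ⟨p', hp', h⟩)
        · exact ⟨p, Or.inl rfl, h⟩
        · exact ⟨p', Or.inr hp', h⟩
      · rintro ⟨p', hp' | hp', h⟩
        · exact Or.inl (hp' ▸ h)
        · exact Or.inr ⟨p', hp', h⟩

-- pointwise: A's nested test equals B's blob test for each gap
lemma addressed_eq (gap : String) (interps : List String) :
    interps.any (fun interpolation =>
      (PySem.Str.split₀ (PySem.Str.lower gap)).any (fun word =>
        PySem.Str.isIn word (PySem.Str.lower interpolation)))
    = (PySem.Str.split₀ (PySem.Str.lower gap)).any (fun word =>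
        PySem.Str.isIn word (PySem.Str.join " " (interps.map (fun i => PySem.Str.lower i)))) := by
  rw [Bool.eq_iff_iff]
  simp only [List.any_eq_true, PySem.Str.isIn_iff_infix]
  constructor
  · rintro ⟨i, hi, w, hwmem, hw⟩
    refine ⟨w, hwmem, ?_⟩
    have hwl : w.toList ∈ PySem.Chars.split₀ (PySem.Str.lower gap).toList := by
      rw [← PySem.Str.split₀_map_toList]
      exact List.mem_map_of_mem hwmem
    obtain ⟨hne, hnosp⟩ := split₀_words _ _ hwl
    rw [PySem.Str.toList_join]
    rw [show (" " : String).toList = [' '] from rfl]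
    rw [infix_join_iff hne hnosp]
    exact ⟨(PySem.Str.lower i).toList, by
      simp only [List.map_map]
      exact List.mem_map_of_mem hi, hw⟩
  · rintro ⟨w, hwmem, hw⟩
    have hwl : w.toList ∈ PySem.Chars.split₀ (PySem.Str.lower gap).toList := by
      rw [← PySem.Str.split₀_map_toList]
      exact List.mem_map_of_mem hwmem
    obtain ⟨hne, hnosp⟩ := split₀_words _ _ hwl
    rw [PySem.Str.toList_join, show (" " : String).toList = [' '] from rfl,
      infix_join_iff hne hnosp] at hw
    obtain ⟨p, hp, hwp⟩ := hw
    simp only [List.map_map, List.mem_map] at hp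
    obtain ⟨i, hi, hip⟩ := hp
    refine ⟨i, hi, w, hwmem, ?_⟩
    rw [← hip] at hwp
    exact hwp

-- ===== VERDICT (by name: the statement is the Claim_ definition above) =====
theorem update_gaps_after_turn_py_spec : Claim_equal_update_gaps_after_turn_py := by
  intro gaps interpolations _
  unfold Spec_update_gaps_after_turn_py update_gaps_after_turn_py update_gaps_after_turn_py_alt
  rw [PySem.List.foldl_append_if_eq_filter]
  rw [List.nil_append]
  apply List.filter_congr
  intro gap _
  simp only [addressed_eq]
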